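-- pv_equiv track=rewrite | github.com/maryam-akhavan-aghdam/Patient-Safety-Project | llm_model.py | group_entities
-- ===== SOURCE A (Python) =====
-- def group_entities(entities):
--     grouped_entities = []
--     current_entity = {
--         'entity': entities[0]['entity_group'],
--         'word': entities[0]['word']
--     }
--
--     for i in range(1, len(entities)):
--         if entities[i]['entity_group'] == current_entity['entity']:
--             current_entity['word'] += entities[i]['word'].replace("##", "")  # Merge subwords
--         else:
--             grouped_entities.append(current_entity)
--             current_entity = {
--                 'entity': entities[i]['entity_group'],
--                 'word': entities[i]['word']
--             }
--
--     grouped_entities.append(current_entity)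
--     return grouped_entities
-- ===== SOURCE B (Python) =====
-- def group_entities(entities):
--     # recursive run-at-a-time decomposition: consume one maximal run of equal
--     # entity_group, emit its merged dict, recurse on the remainder
--     if not entities:
--         return []
--     group = entities[0]['entity_group']
--     word = entities[0]['word']
--     i = 1
--     while i < len(entities) and entities[i]['entity_group'] == group:
--         word += entities[i]['word'].replace("##", "")
--         i += 1
--     return [{'entity': group, 'word': word}] + group_entities(entities[i:])
-- ===== Notes on version B (the rewrite author's own statement) =====
-- stated objective: alternative
-- what changed: A makes one pass with a mutable current-entity accumulator appended at group changes; B recursively peels off one maximal run of equal entity_group at a time and emits each run's merged dict directly, with no accumulator state.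
import Mathlib
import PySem

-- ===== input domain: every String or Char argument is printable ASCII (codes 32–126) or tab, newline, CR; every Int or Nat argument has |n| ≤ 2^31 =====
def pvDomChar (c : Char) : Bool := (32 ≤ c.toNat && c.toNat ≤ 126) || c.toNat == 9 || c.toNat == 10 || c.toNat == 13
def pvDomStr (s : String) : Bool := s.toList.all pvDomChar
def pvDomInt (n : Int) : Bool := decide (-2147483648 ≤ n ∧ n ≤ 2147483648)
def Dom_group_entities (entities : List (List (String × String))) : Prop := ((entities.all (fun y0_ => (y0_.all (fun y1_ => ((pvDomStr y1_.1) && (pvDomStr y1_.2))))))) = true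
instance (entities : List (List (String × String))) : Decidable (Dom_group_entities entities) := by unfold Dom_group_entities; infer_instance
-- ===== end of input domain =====

-- B replaces A's single fold with a mutable current-entity accumulator by recursion
-- that peels off one maximal run of equal entity_group at a time (objective: alternative).
-- Return-value equivalence only; A raises IndexError on [] (excluded by Pre_), B returns [].


-- ===== PORT A =====
-- the loop state is (current group, current word, grouped_entities so far)
def geStepA (s : String × String × List (List (String × String)))
    (e : List (String × String)) : String × String × List (List (String × String)) :=
  let (g, w, acc) := s
  if (e.lookup "entity_group").getD "" == g then
    (g, w ++ PySem.Str.replace ((e.lookup "word").getD "") "##" "", acc)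
  else
    ((e.lookup "entity_group").getD "",
     (e.lookup "word").getD "",
     acc ++ [[("entity", g), ("word", w)]])

def group_entities (entities : List (List (String × String))) : List (List (String × String)) :=
  match entities with
  | [] => []  -- Python raises IndexError here; excluded by Pre_
  | e0 :: rest =>
    let (g, w, acc) := rest.foldl geStepA
      ((e0.lookup "entity_group").getD "", (e0.lookup "word").getD "", [])
    acc ++ [[("entity", g), ("word", w)]]

-- ===== PORT B =====
-- B's while loop: extend word through the run of group g, return (word, remainder)
def geRun (g w : String) (xs : List (List (String × String))) :
    String × List (List (String × String)) :=
  match xs with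
  | [] => (w, [])
  | e :: rest =>
    if (e.lookup "entity_group").getD "" == g then
      geRun g (w ++ PySem.Str.replace ((e.lookup "word").getD "") "##" "") rest
    else (w, e :: rest)

theorem geRun_len (g w : String) (xs : List (List (String × String))) :
    (geRun g w xs).2.length ≤ xs.length := by
  induction xs generalizing w with
  | nil => simp [geRun]
  | cons e rest ih =>
    simp only [geRun]
    split
    · exact le_trans (ih _) (by simp)
    · simp

def group_entities_alt (entities : List (List (String × String))) : List (List (String × String)) :=
  match entities with
  | [] => []
  | e0 :: rest =>
    let g := (e0.lookup "entity_group").getD ""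
    let p := geRun g ((e0.lookup "word").getD "") rest
    [("entity", g), ("word", p.1)] :: group_entities_alt p.2
termination_by entities.length
decreasing_by
  exact Nat.lt_succ_of_le (geRun_len _ _ _)

-- ===== PRECONDITION & SPEC =====
-- Pre_ excludes exactly the inputs where Python A raises: the empty list (IndexError)
-- and entries missing the 'entity_group' or 'word' key (KeyError).
def Pre_group_entities (entities : List (List (String × String))) : Prop :=
  entities ≠ [] ∧ ∀ e ∈ entities,
    (e.lookup "entity_group").isSome ∧ (e.lookup "word").isSome
instance (entities : List (List (String × String))) : Decidable (Pre_group_entities entities) := by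
  unfold Pre_group_entities; infer_instance

def pvWitness_group_entities : (List (List (String × String))) :=
  [[("entity_group", "PER"), ("word", "Jo")], [("entity_group", "PER"), ("word", "##hn")]]

def Spec_group_entities (entities : List (List (String × String))) (out : List (List (String × String))) : Prop := out = group_entities_alt entities
instance (entities : List (List (String × String))) (out : List (List (String × String))) : Decidable (Spec_group_entities entities out) := by unfold Spec_group_entities; infer_instance

-- ===== CLAIM (what is proved, stated in full; the proofs are below) =====
def Claim_equal_group_entities : Prop := ∀ (entities : List (List (String × String))), Dom_group_entities entities → Pre_group_entities entities → Spec_group_entities entities (group_entities entities)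

-- ===== LEMMAS AND PROOFS =====

theorem alt_nil : group_entities_alt [] = [] := by
  rw [group_entities_alt]

theorem alt_cons (e0 : List (String × String)) (rest : List (List (String × String))) :
    group_entities_alt (e0 :: rest) =
      [("entity", (e0.lookup "entity_group").getD ""),
       ("word", (geRun ((e0.lookup "entity_group").getD "") ((e0.lookup "word").getD "") rest).1)]
      :: group_entities_alt (geRun ((e0.lookup "entity_group").getD "") ((e0.lookup "word").getD "") rest).2 := by
  conv_lhs => rw [group_entities_alt]

-- the key invariant: finishing A's fold from state (g, w, acc) equals acc followed by
-- B's run decomposition started with current run (g, w)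
theorem foldA_eq_alt (rest : List (List (String × String))) :
    ∀ (g w : String) (acc : List (List (String × String))),
    (rest.foldl geStepA (g, w, acc)).2.2 ++
      [[("entity", (rest.foldl geStepA (g, w, acc)).1),
        ("word", (rest.foldl geStepA (g, w, acc)).2.1)]] =
    acc ++ ([("entity", g), ("word", (geRun g w rest).1)]
            :: group_entities_alt (geRun g w rest).2) := by
  induction rest with
  | nil => intro g w acc; simp [geRun, alt_nil]
  | cons e rest ih =>
    intro g w acc
    simp only [List.foldl_cons, geStepA, geRun]
    split
    · exact ih _ _ acc
    · rw [ih _ _ (acc ++ [[("entity", g), ("word", w)]]), alt_cons]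
      simp

-- ===== VERDICT =====
theorem group_entities_spec : Claim_equal_group_entities := by
  intro entities _ hpre
  unfold Spec_group_entities
  match entities with
  | [] => exact absurd rfl hpre.1
  | e0 :: rest =>
    show (let (g, w, acc) := rest.foldl geStepA
            ((e0.lookup "entity_group").getD "", (e0.lookup "word").getD "", []);
          acc ++ [[("entity", g), ("word", w)]]) = group_entities_alt (e0 :: rest)
    rw [alt_cons]
    have := foldA_eq_alt rest ((e0.lookup "entity_group").getD "") ((e0.lookup "word").getD "") []
    simpa using this
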